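-- pv_equiv track=rewrite | github.com/WilliamRo/xai-omics | 23-BCP/bcp/bcp_agent.py | find_noise_indices
-- ===== SOURCE A (Python) =====
-- def find_noise_indices(indices: list):
--   bad_indices = []
--   total_list, current_sublist = [], []
--
--   for num in indices:
--     if not current_sublist or num - current_sublist[-1] == 1:
--       current_sublist.append(num)
--     else:
--       total_list.append(current_sublist)
--       current_sublist = [num]
--
--   if current_sublist:
--     total_list.append(current_sublist)
--
--   if len(total_list) == 1: return []
--   else:
--     list_len = [len(l) for l in total_list]
--     index = list_len.index(max(list_len))
--     for l in range(len(total_list)):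
--       if l != index: bad_indices.extend(total_list[l])
--
--   return bad_indices
-- ===== SOURCE B (Python) =====
-- def find_noise_indices(indices: list):
--   # One pass over positions: track the current run's (start, length) and the
--   # best (first longest) run's (start, length); return everything outside the
--   # best run as two slices.  (On empty input A raises ValueError; B returns [].)
--   best_start = best_len = cur_start = cur_len = pos = 0
--   prev = None
--   for num in indices:
--     if cur_len == 0 or num - prev == 1:
--       cur_len += 1
--     else:
--       if cur_len > best_len:
--         best_start, best_len = cur_start, cur_len
--       cur_start, cur_len = pos, 1
--     prev = num
--     pos += 1
--   if cur_len > best_len: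
--     best_start, best_len = cur_start, cur_len
--   return indices[:best_start] + indices[best_start + best_len:]
-- ===== Notes on version B (the rewrite author's own statement) =====
-- stated objective: alternative
-- what changed: Instead of materialising every consecutive run as a sublist, then a lengths list, max/index passes and a final extend loop over the runs, B does one pass keeping only (start,length) of the current and of the first-longest run and returns indices[:s] + indices[s+len:].
import Mathlib
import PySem

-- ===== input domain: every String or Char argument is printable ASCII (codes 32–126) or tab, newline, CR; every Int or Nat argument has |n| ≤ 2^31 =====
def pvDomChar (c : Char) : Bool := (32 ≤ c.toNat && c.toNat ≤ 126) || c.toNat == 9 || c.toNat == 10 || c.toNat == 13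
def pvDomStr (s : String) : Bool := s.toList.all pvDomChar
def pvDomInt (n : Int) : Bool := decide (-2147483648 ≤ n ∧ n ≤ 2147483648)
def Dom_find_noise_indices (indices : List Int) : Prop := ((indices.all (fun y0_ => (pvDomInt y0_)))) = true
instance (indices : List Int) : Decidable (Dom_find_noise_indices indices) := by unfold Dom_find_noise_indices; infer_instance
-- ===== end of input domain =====

-- B replaces A's run-materialising pipeline (sublists, lengths list, max/index passes, extend loop)
-- by a single pass tracking only (start, length) of the current and of the first-longest run; same
-- return value on every non-empty list (objective: alternative, same O(n) cost).

-- ===== PORT A =====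
-- A-side helper: body of A's 'for num in indices' loop; state = (total_list, current_sublist)
def pvStepA (st : List (List Int) × List Int) (num : Int) : List (List Int) × List Int :=
  if st.2 = [] ∨ num - PySem.List.pyGetD st.2 (-1) 0 = 1 then (st.1, st.2 ++ [num])
  else (st.1 ++ [st.2], [num])

def find_noise_indices (indices : List Int) : List Int :=
  let st := indices.foldl pvStepA ([], [])
  let total := if st.2 ≠ [] then st.1 ++ [st.2] else st.1
  if total.length = 1 then []
  else
    let list_len := total.map List.length
    match PySem.List.max? list_len (fun y => y) with
    | none => []   -- Python raises ValueError here (max of empty list); excluded by Pre_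
    | some m =>
      let index := (PySem.List.index? list_len m).getD 0
      (PySem.List.pyRange 0 total.length 1).foldl
        (fun bad l => if l ≠ (index : Int) then bad ++ PySem.List.pyGetD total l [] else bad) []

-- ===== PORT B =====
-- B-side helper: body of B's loop; state = (best_start, best_len, cur_start, cur_len, pos, prev).
-- 'num - prev == 1' (evaluated only when cur_len ≠ 0, so prev is bound) is 'prev = some (num - 1)'.
def pvStepB (st : Nat × Nat × Nat × Nat × Nat × Option Int) (num : Int) :
    Nat × Nat × Nat × Nat × Nat × Option Int :=
  if st.2.2.2.1 = 0 ∨ st.2.2.2.2.2 = some (num - 1) then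
    (st.1, st.2.1, st.2.2.1, st.2.2.2.1 + 1, st.2.2.2.2.1 + 1, some num)
  else if st.2.2.2.1 > st.2.1 then
    (st.2.2.1, st.2.2.2.1, st.2.2.2.2.1, 1, st.2.2.2.2.1 + 1, some num)
  else
    (st.1, st.2.1, st.2.2.2.2.1, 1, st.2.2.2.2.1 + 1, some num)

def find_noise_indices_alt (indices : List Int) : List Int :=
  let st := indices.foldl pvStepB (0, 0, 0, 0, 0, none)
  let s := if st.2.2.2.1 > st.2.1 then st.2.2.1 else st.1
  let len := if st.2.2.2.1 > st.2.1 then st.2.2.2.1 else st.2.1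
  indices.take s ++ indices.drop (s + len)

-- ===== PRECONDITION & SPEC =====
-- Pre_ excludes only the empty list, on which A raises ValueError (max of an empty list).
def Pre_find_noise_indices (indices : List Int) : Prop := indices ≠ []
instance (indices : List Int) : Decidable (Pre_find_noise_indices indices) := by
  unfold Pre_find_noise_indices; infer_instance
def pvWitness_find_noise_indices : List Int := [1, 2, 5]

def Spec_find_noise_indices (indices : List Int) (out : List Int) : Prop :=
  out = find_noise_indices_alt indices
instance (indices : List Int) (out : List Int) : Decidable (Spec_find_noise_indices indices out) := by
  unfold Spec_find_noise_indices; infer_instance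

-- ===== CLAIM (what is proved, stated in full; the proofs are below) =====
def Claim_equal_find_noise_indices : Prop := ∀ (indices : List Int),
  Dom_find_noise_indices indices → Pre_find_noise_indices indices →
  Spec_find_noise_indices indices (find_noise_indices indices)

-- ===== LEMMAS AND PROOFS =====

-- (start, length, end-position) of the first longest element of a list of runs
def pvBest (T : List (List Int)) : Nat × Nat × Nat :=
  T.foldl (fun st r => if r.length > st.2.1 then (st.2.2, r.length, st.2.2 + r.length)
                       else (st.1, st.2.1, st.2.2 + r.length)) (0, 0, 0)

def pvSum (T : List (List Int)) : Nat := (T.map List.length).sum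

-- the simulation relation between A's loop state and B's loop state
def pvRel (st : List (List Int) × List Int) (bt : Nat × Nat × Nat × Nat × Nat × Option Int) : Prop :=
  bt = ((pvBest st.1).1, (pvBest st.1).2.1, pvSum st.1, st.2.length,
        pvSum st.1 + st.2.length, st.2.getLast?)
  ∧ (pvBest st.1).2.2 = pvSum st.1

lemma pvBest_concat (T : List (List Int)) (C : List Int) :
    pvBest (T ++ [C]) =
      (if C.length > (pvBest T).2.1 then ((pvBest T).2.2, C.length, (pvBest T).2.2 + C.length)
       else ((pvBest T).1, (pvBest T).2.1, (pvBest T).2.2 + C.length)) := by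
  simp [pvBest, List.foldl_append]

lemma pvSum_concat (T : List (List Int)) (C : List Int) : pvSum (T ++ [C]) = pvSum T + C.length := by
  simp [pvSum]

lemma pvCond_iff (C : List Int) (num : Int) :
    (C = [] ∨ num - PySem.List.pyGetD C (-1) 0 = 1) ↔
      (C.length = 0 ∨ C.getLast? = some (num - 1)) := by
  rcases eq_or_ne C [] with hC | hC
  · simp [hC]
  · have hlast : PySem.List.pyGetD C (-1) 0 = C.getLast hC := PySem.List.pyGetD_neg_one C 0 hC
    rw [hlast]
    simp [List.length_eq_zero_iff, hC, List.getLast?_eq_getLast_of_ne_nil hC]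
    omega

lemma pvStep_rel (st : List (List Int) × List Int) (bt : Nat × Nat × Nat × Nat × Nat × Option Int)
    (num : Int) (h : pvRel st bt) : pvRel (pvStepA st num) (pvStepB bt num) := by
  obtain ⟨T, C⟩ := st
  obtain ⟨hbt, hend⟩ := h
  subst hbt
  by_cases hc : C = [] ∨ num - PySem.List.pyGetD C (-1) 0 = 1
  · have hc' := (pvCond_iff C num).mp hc
    simp only [pvStepA, pvStepB, if_pos hc, if_pos hc']
    refine ⟨?_, hend⟩
    simp [Nat.add_assoc]
  · have hc' := (not_congr (pvCond_iff C num)).mp hc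
    simp only [pvStepA, pvStepB, if_neg hc, if_neg hc']
    constructor
    · rw [pvBest_concat, pvSum_concat, hend]
      by_cases hgt : C.length > (pvBest T).2.1
      · simp [hgt]
      · simp [hgt]
    · rw [pvBest_concat, pvSum_concat, hend]
      by_cases hgt : C.length > (pvBest T).2.1
      · simp [if_pos hgt]
      · simp [if_neg hgt]

lemma pvFold_rel (l : List Int) : ∀ st bt, pvRel st bt →
    pvRel (l.foldl pvStepA st) (l.foldl pvStepB bt) := by
  induction l with
  | nil => intro st bt h; exact h
  | cons x xs ih => intro st bt h; exact ih _ _ (pvStep_rel st bt x h)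

lemma pvFlatten_inv (l : List Int) : ∀ (T : List (List Int)) (C : List Int),
    (l.foldl pvStepA (T, C)).1.flatten ++ (l.foldl pvStepA (T, C)).2 = T.flatten ++ C ++ l := by
  induction l with
  | nil => intro T C; simp
  | cons x xs ih =>
    intro T C
    simp only [List.foldl_cons]
    by_cases hc : C = [] ∨ x - PySem.List.pyGetD C (-1) 0 = 1
    · rw [show pvStepA (T, C) x = (T, C ++ [x]) by simp [pvStepA, hc]]
      rw [ih]
      simp
    · rw [show pvStepA (T, C) x = (T ++ [C], [x]) by simp [pvStepA, hc]]
      rw [ih]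
      simp

lemma pvCur_ne_nil (l : List Int) : ∀ (T : List (List Int)) (C : List Int),
    (C ≠ [] ∨ l ≠ []) → (l.foldl pvStepA (T, C)).2 ≠ [] := by
  induction l with
  | nil => intro T C h; simpa using h.resolve_right (by simp)
  | cons x xs ih =>
    intro T C _
    simp only [List.foldl_cons]
    by_cases hc : C = [] ∨ x - PySem.List.pyGetD C (-1) 0 = 1
    · rw [show pvStepA (T, C) x = (T, C ++ [x]) by simp [pvStepA, hc]]
      exact ih _ _ (Or.inl (by simp))
    · rw [show pvStepA (T, C) x = (T ++ [C], [x]) by simp [pvStepA, hc]]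
      exact ih _ _ (Or.inl (by simp))

lemma pvBest_spec (rs : List (List Int)) (hne : rs ≠ []) :
    ∃ (idx : Nat) (h : idx < rs.length),
      pvBest rs = (pvSum (rs.take idx), rs[idx].length, pvSum rs) ∧
      (∀ j (hj : j < rs.length), rs[j].length ≤ rs[idx].length) ∧
      (∀ j (hj : j < idx), rs[j].length < rs[idx].length) := by
  induction rs using List.reverseRecOn with
  | nil => exact absurd rfl hne
  | append_singleton T r ih =>
    rcases eq_or_ne T [] with hT | hT
    · subst hT
      refine ⟨0, by simp, ?_, ?_, ?_⟩
      · by_cases h0 : r.length > 0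
        · simp [pvBest, pvSum, if_pos h0]
        · simp [pvBest, pvSum, if_neg h0]
          omega
      · intro j hj
        have hj0 : j = 0 := by simp at hj; omega
        subst hj0; simp
      · intro j hj; omega
    · obtain ⟨idx, hlt, heq, hmax, hstrict⟩ := ih hT
      have hb : pvBest (T ++ [r]) =
          (if r.length > T[idx].length then (pvSum T, r.length, pvSum T + r.length)
           else (pvSum (T.take idx), T[idx].length, pvSum T + r.length)) := by
        rw [pvBest_concat, heq]
      by_cases hgt : r.length > T[idx].length
      · refine ⟨T.length, by simp, ?_, ?_, ?_⟩
        · rw [hb, if_pos hgt, pvSum_concat]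
          congr 1
          · congr 1
            rw [List.take_append_of_le_length (le_refl T.length), List.take_length]
          · rw [List.getElem_append_right (le_refl T.length)]
            simp
        · intro j hj
          rw [List.getElem_append_right (le_refl T.length)]
          simp only [Nat.sub_self, List.getElem_singleton]
          simp only [List.length_append, List.length_singleton] at hj
          rcases Nat.lt_or_ge j T.length with hjT | hjT
          · rw [List.getElem_append_left hjT]
            exact le_of_lt (lt_of_le_of_lt (hmax j hjT) hgt)
          · have hje : j = T.length := by omega
            subst hje
            rw [List.getElem_append_right (le_refl T.length)]
            simp
        · intro j hj
          rw [List.getElem_append_left hj, List.getElem_append_right (le_refl T.length)]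
          simp only [Nat.sub_self, List.getElem_singleton]
          exact lt_of_le_of_lt (hmax j hj) hgt
      · refine ⟨idx, by simp only [List.length_append, List.length_singleton]; omega, ?_, ?_, ?_⟩
        · rw [hb, if_neg hgt, pvSum_concat]
          congr 1
          · congr 1
            rw [List.take_append_of_le_length (le_of_lt hlt)]
          · rw [List.getElem_append_left hlt]
        · intro j hj
          rw [List.getElem_append_left hlt]
          simp only [List.length_append, List.length_singleton] at hj
          rcases Nat.lt_or_ge j T.length with hjT | hjT
          · rw [List.getElem_append_left hjT]; exact hmax j hjT
          · have hje : j = T.length := by omega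
            subst hje
            rw [List.getElem_append_right (le_refl T.length)]
            simp only [Nat.sub_self, List.getElem_singleton]
            omega
        · intro j hj
          rw [List.getElem_append_left hlt, List.getElem_append_left (lt_trans hj hlt)]
          exact hstrict j hj

lemma pvMax_eq (rs : List (List Int)) (idx : Nat) (hlt : idx < rs.length)
    (hmax : ∀ j (hj : j < rs.length), rs[j].length ≤ rs[idx].length) :
    PySem.List.max? (rs.map List.length) (fun y => y) = some rs[idx].length := by
  have hne : rs.map List.length ≠ [] := by
    simp only [ne_eq, List.map_eq_nil_iff]
    intro h; subst h; simp at hlt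
  obtain ⟨m', hm'⟩ := Option.ne_none_iff_exists'.mp
    ((not_congr (PySem.List.max?_eq_none_iff (rs.map List.length) (fun y => y))).mpr hne)
  have hmem : m' ∈ rs.map List.length := PySem.List.max?_mem hm'
  obtain ⟨r, hr, hrm⟩ := List.mem_map.mp hmem
  obtain ⟨j, hj, hje⟩ := List.mem_iff_getElem.mp hr
  have h1 : m' ≤ rs[idx].length := by
    rw [← hrm, ← hje]; exact hmax j hj
  have h2 : rs[idx].length ≤ m' := by
    have := PySem.List.max?_isMax hm' rs[idx].length
      (List.mem_map.mpr ⟨rs[idx], List.getElem_mem hlt, rfl⟩)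
    simpa using this
  rw [hm']
  congr 1
  omega

lemma pvIndex_eq (rs : List (List Int)) (idx : Nat) (hlt : idx < rs.length)
    (hstrict : ∀ j (hj : j < idx), rs[j].length < rs[idx].length) :
    PySem.List.index? (rs.map List.length) rs[idx].length = some idx := by
  rw [PySem.List.index?_eq_some_iff]
  have hlt' : idx < (rs.map List.length).length := by simpa using hlt
  refine ⟨(rs.map List.length).take idx, (rs.map List.length).drop (idx + 1), ?_, ?_, ?_⟩
  · conv_lhs => rw [← List.take_append_drop idx (rs.map List.length)]
    rw [List.drop_eq_getElem_cons hlt', List.getElem_map]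
  · simp [Nat.le_of_lt hlt]
  · intro hmem
    obtain ⟨j, hj, hje⟩ := List.mem_iff_getElem.mp hmem
    have hjlen : j < idx := by simp at hj; omega
    rw [List.getElem_take, List.getElem_map] at hje
    exact absurd hje (Nat.ne_of_lt (hstrict j hjlen))

lemma pvFold_concat (xs : List Int) (g : Int → List Int) (acc : List Int) :
    xs.foldl (fun bad l => bad ++ g l) acc = acc ++ (xs.map g).flatten := by
  rw [← List.foldl_map (f := g) (g := fun a b => a ++ b)]
  exact PySem.List.foldl_append_eq_flatten _ _

lemma pvMap_get_range_lo (rs : List (List Int)) (idx : Nat) (hle : idx ≤ rs.length) :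
    (PySem.List.pyRange 0 (idx : Int) 1).map (fun l => PySem.List.pyGetD rs l []) = rs.take idx := by
  rw [PySem.List.pyRange_one]
  simp only [Int.sub_zero, Int.toNat_natCast, List.map_map]
  have hcg : ∀ k ∈ List.range idx,
      ((fun l => PySem.List.pyGetD rs l []) ∘ fun k : Nat => (0 : Int) + k) k
        = (fun k : Nat => rs.getD k []) k := by
    intro k hk
    simp [PySem.List.pyGetD_natCast]
  rw [List.map_congr_left hcg]
  apply List.ext_getElem
  · simp [hle]
  · intro i h1 h2
    have hi : i < idx := by simpa using h1
    simp [List.getD_eq_getElem?_getD, List.getElem?_eq_getElem (by omega : i < rs.length)]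

lemma pvTake_sum_flatten (L : List (List Int)) (i : Nat) :
    L.flatten.take (pvSum (L.take i)) = (L.take i).flatten := by
  induction L generalizing i with
  | nil => simp
  | cons x Ls ih =>
    cases i with
    | zero => simp [pvSum]
    | succ n =>
      have hsum : pvSum ((x :: Ls).take (n + 1)) = x.length + pvSum (Ls.take n) := by
        simp [pvSum]
      rw [hsum, List.take_succ_cons, List.flatten_cons, List.flatten_cons, List.take_append,
        List.take_of_length_le (by omega),
        show x.length + pvSum (Ls.take n) - x.length = pvSum (Ls.take n) by omega, ih n]

lemma pvDrop_sum_flatten (L : List (List Int)) (i : Nat) :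
    L.flatten.drop (pvSum (L.take i)) = (L.drop i).flatten := by
  induction L generalizing i with
  | nil => simp
  | cons x Ls ih =>
    cases i with
    | zero => simp [pvSum]
    | succ n =>
      have hsum : pvSum ((x :: Ls).take (n + 1)) = x.length + pvSum (Ls.take n) := by
        simp [pvSum]
      rw [hsum, List.drop_succ_cons, List.flatten_cons, List.drop_append,
        List.drop_of_length_le (by omega),
        show x.length + pvSum (Ls.take n) - x.length = pvSum (Ls.take n) by omega, ih n]
      simp

lemma pvRange_fold (rs : List (List Int)) (idx : Nat) (h : idx < rs.length) :
    (PySem.List.pyRange 0 rs.length 1).foldl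
        (fun bad l => if l ≠ (idx : Int) then bad ++ PySem.List.pyGetD rs l [] else bad) []
      = (rs.take idx).flatten ++ (rs.drop (idx + 1)).flatten := by
  have h1 : (0 : Int) ≤ (idx : Int) := by positivity
  have h2 : (idx : Int) ≤ (rs.length : Int) := by exact_mod_cast le_of_lt h
  rw [PySem.List.pyRange_one_append 0 (idx : Int) (rs.length : Int) h1 h2]
  rw [show PySem.List.pyRange (idx : Int) (rs.length : Int) 1
        = (idx : Int) :: PySem.List.pyRange ((idx : Int) + 1) (rs.length : Int) 1 from
      PySem.List.pyRange_one_cons (by exact_mod_cast h)]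
  rw [List.foldl_append]
  have e1 : (PySem.List.pyRange 0 (idx : Int) 1).foldl
      (fun bad l => if l ≠ (idx : Int) then bad ++ PySem.List.pyGetD rs l [] else bad) []
      = (rs.take idx).flatten := by
    have hcg : ∀ (acc : List Int) (x : Int), x ∈ PySem.List.pyRange 0 (idx : Int) 1 →
        (fun bad l => if l ≠ (idx : Int) then bad ++ PySem.List.pyGetD rs l [] else bad) acc x
          = (fun bad l => bad ++ PySem.List.pyGetD rs l []) acc x := by
      intro acc x hx
      have hb := (PySem.List.mem_pyRange_one).mp hx
      simp only []
      rw [if_pos (by omega)]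
    rw [PySem.List.foldl_congr_mem _ _ _ _ hcg, pvFold_concat, pvMap_get_range_lo rs idx (le_of_lt h)]
    simp
  rw [e1]
  simp only [List.foldl_cons, if_neg (by omega : ¬ ((idx : Int) ≠ (idx : Int)))]
  have hcg2 : ∀ (acc : List Int) (x : Int), x ∈ PySem.List.pyRange ((idx : Int) + 1) (rs.length : Int) 1 →
      (fun bad l => if l ≠ (idx : Int) then bad ++ PySem.List.pyGetD rs l [] else bad) acc x
        = (fun bad l => bad ++ PySem.List.pyGetD rs l []) acc x := by
    intro acc x hx
    have hb := (PySem.List.mem_pyRange_one).mp hx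
    simp only []
    rw [if_pos (by omega)]
  rw [PySem.List.foldl_congr_mem _ _ _ _ hcg2, pvFold_concat]
  congr 1
  have hmp := PySem.List.map_pyGetD_pyRange' (xs := rs) (a := (idx : Int) + 1)
    (d := ([] : List Int)) (by positivity)
  rw [show ((idx : Int) + 1) = (((idx + 1 : Nat)) : Int) by push_cast; ring] at hmp ⊢
  rw [hmp]
  congr 1

-- ===== VERDICT (by name: the statement is the Claim_ definition above) =====
-- (proof-only restatements of the two port bodies, used to name the loop results)
def pvAbody (total : List (List Int)) : List Int :=
  if total.length = 1 then []
  else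
    match PySem.List.max? (total.map List.length) (fun y => y) with
    | none => []
    | some m =>
      (PySem.List.pyRange 0 total.length 1).foldl
        (fun bad l => if l ≠ (((PySem.List.index? (total.map List.length) m).getD 0 : Nat) : Int)
          then bad ++ PySem.List.pyGetD total l [] else bad) []

def pvBbody (indices : List Int) (bt : Nat × Nat × Nat × Nat × Nat × Option Int) : List Int :=
  indices.take (if bt.2.2.2.1 > bt.2.1 then bt.2.2.1 else bt.1) ++
    indices.drop ((if bt.2.2.2.1 > bt.2.1 then bt.2.2.1 else bt.1) +
      (if bt.2.2.2.1 > bt.2.1 then bt.2.2.2.1 else bt.2.1))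

lemma pvFinal (indices : List Int) (T : List (List Int)) (C : List Int)
    (hflat : T.flatten ++ C = indices)
    (hend : (pvBest T).2.2 = pvSum T) :
    pvAbody (T ++ [C]) = pvBbody indices
      ((pvBest T).1, (pvBest T).2.1, pvSum T, C.length, pvSum T + C.length, C.getLast?) := by
  obtain ⟨idx, hlt, hbest, hmax, hstrict⟩ := pvBest_spec (T ++ [C]) (by simp)
  have hsel1 : (if C.length > (pvBest T).2.1 then pvSum T else (pvBest T).1)
      = pvSum ((T ++ [C]).take idx) := by
    have h1 : (pvBest (T ++ [C])).1 = pvSum ((T ++ [C]).take idx) := by rw [hbest]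
    rw [← h1, pvBest_concat, hend]
    by_cases hgt : C.length > (pvBest T).2.1
    · simp only [if_pos hgt]
    · simp only [if_neg hgt]
  have hsel2 : (if C.length > (pvBest T).2.1 then C.length else (pvBest T).2.1)
      = (T ++ [C])[idx].length := by
    have h2 : (pvBest (T ++ [C])).2.1 = (T ++ [C])[idx].length := by rw [hbest]
    rw [← h2, pvBest_concat, hend]
    by_cases hgt : C.length > (pvBest T).2.1
    · simp only [if_pos hgt]
    · simp only [if_neg hgt]
  unfold pvBbody
  dsimp only
  rw [hsel1, hsel2]
  have hflat' : (T ++ [C]).flatten = indices := by rw [← hflat]; simp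
  have hsum : pvSum ((T ++ [C]).take (idx + 1))
      = pvSum ((T ++ [C]).take idx) + (T ++ [C])[idx].length := by
    rw [List.take_add_one, List.getElem?_eq_getElem hlt]
    simp only [Option.toList_some]
    exact pvSum_concat _ _
  rw [hsum.symm, ← hflat', pvTake_sum_flatten, pvDrop_sum_flatten]
  unfold pvAbody
  by_cases hone : (T ++ [C]).length = 1
  · rw [if_pos hone]
    have hidx0 : idx = 0 := by omega
    subst hidx0
    rw [show (T ++ [C]).take 0 = [] from rfl, List.drop_eq_nil_of_le (by omega)]
    simp
  · rw [if_neg hone]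
    cases hmx : PySem.List.max? ((T ++ [C]).map List.length) (fun y => y) with
    | none =>
      rw [pvMax_eq (T ++ [C]) idx hlt hmax] at hmx
      exact absurd hmx (by simp)
    | some m =>
      have hm : m = (T ++ [C])[idx].length := by
        rw [pvMax_eq (T ++ [C]) idx hlt hmax] at hmx
        exact (Option.some_inj.mp hmx).symm
      subst hm
      dsimp only
      rw [pvIndex_eq (T ++ [C]) idx hlt hstrict]
      simp only [Option.getD_some]
      exact pvRange_fold (T ++ [C]) idx hlt

theorem find_noise_indices_spec : Claim_equal_find_noise_indices := by
  intro indices _ hpre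
  unfold Spec_find_noise_indices
  obtain ⟨hbt, hend⟩ := pvFold_rel indices ([], []) (0, 0, 0, 0, 0, none) ⟨rfl, rfl⟩
  have hC : (indices.foldl pvStepA ([], [])).2 ≠ [] := pvCur_ne_nil indices [] [] (Or.inr hpre)
  have hflat : (indices.foldl pvStepA ([], [])).1.flatten ++ (indices.foldl pvStepA ([], [])).2
      = indices := by simpa using pvFlatten_inv indices [] []
  rw [show find_noise_indices indices = pvAbody
        (if (indices.foldl pvStepA ([], [])).2 ≠ []
          then (indices.foldl pvStepA ([], [])).1 ++ [(indices.foldl pvStepA ([], [])).2]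
          else (indices.foldl pvStepA ([], [])).1) from rfl,
      show find_noise_indices_alt indices
        = pvBbody indices (indices.foldl pvStepB (0, 0, 0, 0, 0, none)) from rfl]
  rw [hbt, if_pos hC]
  exact pvFinal indices _ _ hflat hend
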